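-- pv_equiv track=rewrite | github.com/kypello/Scummpiler | costume_codec.py | get_ordered_offsets
-- ===== SOURCE A (Python) =====
-- def get_ordered_offsets(offset_table):
--     ordered_offsets = []
--
--     for i in range(len(offset_table)):
--         offset = offset_table[i]
--
--         if offset <= 2:
--             continue
--
--         if offset in ordered_offsets:
--             continue
--
--         j = 0
--         while j < len(ordered_offsets):
--             if offset < ordered_offsets[j]:
--                 break
--
--             j += 1
--
--         ordered_offsets.insert(j, offset)
--
--     return ordered_offsets
-- ===== SOURCE B (Python) =====
-- def get_ordered_offsets(offset_table):
--     filtered = [x for x in offset_table if x > 2]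
--     filtered.sort()
--     result = []
--     for x in filtered:
--         if not result or x != result[-1]:
--             result.append(x)
--     return result
-- ===== Notes on version B (the rewrite author's own statement) =====
-- stated objective: faster
-- what changed: Replaces the quadratic membership-test-plus-linear-insertion loop with filter, a library sort, and one linear adjacent-duplicate-removal pass.
import Mathlib
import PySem

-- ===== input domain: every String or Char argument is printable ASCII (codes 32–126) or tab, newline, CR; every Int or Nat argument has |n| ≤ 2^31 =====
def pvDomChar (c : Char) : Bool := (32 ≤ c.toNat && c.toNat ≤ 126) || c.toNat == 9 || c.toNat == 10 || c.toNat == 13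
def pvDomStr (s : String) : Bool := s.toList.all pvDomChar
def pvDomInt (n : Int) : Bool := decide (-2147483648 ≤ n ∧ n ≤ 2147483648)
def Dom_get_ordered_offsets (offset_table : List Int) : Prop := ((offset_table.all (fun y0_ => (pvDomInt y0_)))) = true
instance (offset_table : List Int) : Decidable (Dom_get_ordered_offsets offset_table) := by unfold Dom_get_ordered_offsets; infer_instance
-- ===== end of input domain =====

-- B replaces A's quadratic scan-and-insert loop by filter + library sort + one adjacent-dedup pass (faster).

-- ===== PORT A =====
-- the `while j < len(...)`/`insert(j, offset)` pair: insert before the first strictly larger element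
def pvInsA (x : Int) : List Int → List Int
  | [] => [x]
  | y :: ys => if x < y then x :: y :: ys else y :: pvInsA x ys

def pvStepA (acc : List Int) (offset : Int) : List Int :=
  if offset ≤ 2 then acc
  else if offset ∈ acc then acc
  else pvInsA offset acc

def get_ordered_offsets (offset_table : List Int) : List Int :=
  offset_table.foldl pvStepA []

-- ===== PORT B =====
def get_ordered_offsets_alt (offset_table : List Int) : List Int :=
  let filtered := offset_table.filter (fun x => decide (2 < x))
  let sortedL := PySem.List.sorted filtered (fun x => x) false
  sortedL.foldl (fun res x => if res.isEmpty || res.getLast? != some x then res ++ [x] else res) []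

-- ===== PRECONDITION & SPEC =====
def Spec_get_ordered_offsets (offset_table : List Int) (out : List Int) : Prop := out = get_ordered_offsets_alt offset_table
instance (offset_table : List Int) (out : List Int) : Decidable (Spec_get_ordered_offsets offset_table out) := by unfold Spec_get_ordered_offsets; infer_instance

-- ===== CLAIM (what is proved, stated in full; the proofs are below) =====
def Claim_equal_get_ordered_offsets : Prop := ∀ (offset_table : List Int), Dom_get_ordered_offsets offset_table → Spec_get_ordered_offsets offset_table (get_ordered_offsets offset_table)

-- ===== LEMMAS AND PROOFS =====

theorem mem_pvInsA (a x : Int) (l : List Int) : a ∈ pvInsA x l ↔ a = x ∨ a ∈ l := by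
  induction l with
  | nil => simp [pvInsA]
  | cons y ys ih =>
    simp only [pvInsA]
    split
    · simp
    · simp [ih]
      tauto

theorem pairwise_pvInsA (x : Int) (l : List Int) (hs : l.Pairwise (· < ·)) (hx : x ∉ l) :
    (pvInsA x l).Pairwise (· < ·) := by
  induction l with
  | nil => simp [pvInsA]
  | cons y ys ih =>
    rcases List.pairwise_cons.1 hs with ⟨hy, hys⟩
    by_cases h : x < y
    · simp only [pvInsA, if_pos h]
      exact List.pairwise_cons.2 ⟨by
        intro a ha
        rcases List.mem_cons.1 ha with rfl | ha
        · exact h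
        · exact lt_trans h (hy a ha), hs⟩
    · simp only [pvInsA, if_neg h]
      have hxy : y < x := lt_of_le_of_ne (not_lt.1 h) (by
        intro hyx; exact hx (by simp [hyx]))
      refine List.pairwise_cons.2 ⟨?_, ih hys (fun hm => hx (List.mem_cons_of_mem _ hm))⟩
      intro a ha
      rcases (mem_pvInsA a x ys).1 ha with rfl | ha
      · exact hxy
      · exact hy a ha

theorem foldA_inv (l : List Int) : ∀ acc : List Int, acc.Pairwise (· < ·) →
    (l.foldl pvStepA acc).Pairwise (· < ·) ∧
    ∀ a, a ∈ l.foldl pvStepA acc ↔ a ∈ acc ∨ (a ∈ l ∧ 2 < a) := by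
  induction l with
  | nil => intro acc h; simpa using h
  | cons x xs ih =>
    intro acc hacc
    by_cases h1 : x ≤ 2
    · rw [List.foldl_cons, show pvStepA acc x = acc from by simp [pvStepA, h1]]
      rcases ih acc hacc with ⟨hp, hm⟩
      refine ⟨hp, fun a => ?_⟩
      rw [hm a]
      constructor
      · rintro (h | ⟨h, h2⟩) <;> [exact Or.inl h; exact Or.inr ⟨List.mem_cons_of_mem _ h, h2⟩]
      · rintro (h | ⟨h, h2⟩)
        · exact Or.inl h
        · rcases List.mem_cons.1 h with rfl | h
          · omega
          · exact Or.inr ⟨h, h2⟩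
    · by_cases h2 : x ∈ acc
      · rw [List.foldl_cons, show pvStepA acc x = acc from by simp [pvStepA, h1, h2]]
        rcases ih acc hacc with ⟨hp, hm⟩
        refine ⟨hp, fun a => ?_⟩
        rw [hm a]
        constructor
        · rintro (h | ⟨h, hgt⟩) <;> [exact Or.inl h; exact Or.inr ⟨List.mem_cons_of_mem _ h, hgt⟩]
        · rintro (h | ⟨h, hgt⟩)
          · exact Or.inl h
          · rcases List.mem_cons.1 h with rfl | h
            · exact Or.inl h2
            · exact Or.inr ⟨h, hgt⟩
      · rw [List.foldl_cons, show pvStepA acc x = pvInsA x acc from by simp [pvStepA, h1, h2]]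
        rcases ih (pvInsA x acc) (pairwise_pvInsA x acc hacc h2) with ⟨hp, hm⟩
        refine ⟨hp, fun a => ?_⟩
        rw [hm a, mem_pvInsA]
        constructor
        · rintro ((rfl | h) | ⟨h, hgt⟩)
          · exact Or.inr ⟨List.mem_cons_self, by omega⟩
          · exact Or.inl h
          · exact Or.inr ⟨List.mem_cons_of_mem _ h, hgt⟩
        · rintro (h | ⟨h, hgt⟩)
          · exact Or.inl (Or.inr h)
          · rcases List.mem_cons.1 h with rfl | h
            · exact Or.inl (Or.inl rfl)
            · exact Or.inr ⟨h, hgt⟩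

theorem le_getLast_of_pairwise : ∀ {l : List Int} {L : Int},
    l.Pairwise (· < ·) → l.getLast? = some L → ∀ a ∈ l, a ≤ L := by
  intro l
  induction l with
  | nil => intro L _ hL; simp at hL
  | cons y ys ih =>
    intro L hp hL a ha
    rcases List.pairwise_cons.1 hp with ⟨hy, hys⟩
    cases ys with
    | nil =>
      simp at ha hL
      omega
    | cons z zs =>
      rw [List.getLast?_cons_cons] at hL
      rcases List.mem_cons.1 ha with rfl | ha
      · have hz : a < z := hy z List.mem_cons_self
        have hzL : z ≤ L := ih hys hL z List.mem_cons_self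
        omega
      · exact ih hys hL a ha

-- the dedup fold: invariants and membership
theorem foldB_inv (s : List Int) : ∀ acc : List Int, acc.Pairwise (· < ·) →
    s.Pairwise (· ≤ ·) → (∀ a ∈ acc, ∀ b ∈ s, a ≤ b) →
    (s.foldl (fun res x => if res.isEmpty || res.getLast? != some x then res ++ [x] else res) acc).Pairwise (· < ·) ∧
    ∀ a, a ∈ s.foldl (fun res x => if res.isEmpty || res.getLast? != some x then res ++ [x] else res) acc ↔ a ∈ acc ∨ a ∈ s := by
  induction s with
  | nil => intro acc h _ _; simpa using h
  | cons v xs ih =>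
    intro acc hacc hs hle
    rcases List.pairwise_cons.1 hs with ⟨hx, hxs⟩
    simp only [List.foldl_cons]
    by_cases hc : (acc.isEmpty || acc.getLast? != some v) = true
    · rw [if_pos hc]
      have hpair : (acc ++ [v]).Pairwise (· < ·) := by
        refine List.pairwise_append.2 ⟨hacc, by simp, ?_⟩
        intro a ha b hb
        have hb' : b = v := by simpa using hb
        subst b
        have hax : a ≤ v := hle a ha v List.mem_cons_self
        rcases Bool.or_eq_true_iff.1 hc with he | hne
        · exact absurd (List.isEmpty_iff.1 he ▸ ha) (List.not_mem_nil)
        · rcases hL : acc.getLast? with _ | L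
          · cases acc with
            | nil => simp at ha
            | cons c cs => simp [List.getLast?_eq_none_iff] at hL
          · have haL : a ≤ L := le_getLast_of_pairwise hacc hL a ha
            have : L ≠ v := by
              simp [hL] at hne; exact hne
            have hLx : L ≤ v := hle L (List.mem_of_getLast? hL) v List.mem_cons_self
            omega
      have hle' : ∀ a ∈ acc ++ [v], ∀ b ∈ xs, a ≤ b := by
        intro a ha b hb
        rcases List.mem_append.1 ha with ha | ha
        · exact hle a ha b (List.mem_cons_of_mem _ hb)
        · simp at ha; subst ha; exact hx b hb
      rcases ih (acc ++ [v]) hpair hxs hle' with ⟨hp, hm⟩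
      refine ⟨hp, fun a => ?_⟩
      rw [hm a]
      simp [List.mem_append, List.mem_cons]
      tauto
    · rw [if_neg hc]
      have hxacc : v ∈ acc := by
        simp only [Bool.or_eq_true_iff, not_or, Bool.not_eq_true] at hc
        rcases hc with ⟨_, hne⟩
        rw [bne_eq_false_iff_eq] at hne
        exact List.mem_of_getLast? hne
      have hle' : ∀ a ∈ acc, ∀ b ∈ xs, a ≤ b :=
        fun a ha b hb => hle a ha b (List.mem_cons_of_mem _ hb)
      rcases ih acc hacc hxs hle' with ⟨hp, hm⟩
      refine ⟨hp, fun a => ?_⟩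
      rw [hm a]
      simp [List.mem_cons]
      constructor
      · rintro (h | h) <;> tauto
      · rintro (h | rfl | h) <;> [tauto; exact Or.inl hxacc; tauto]

theorem eq_of_pairwise_lt_of_mem_iff : ∀ {l1 l2 : List Int},
    l1.Pairwise (· < ·) → l2.Pairwise (· < ·) → (∀ a, a ∈ l1 ↔ a ∈ l2) → l1 = l2 := by
  intro l1
  induction l1 with
  | nil =>
    intro l2 _ _ h
    cases l2 with
    | nil => rfl
    | cons y ys => exact absurd ((h y).2 List.mem_cons_self) (List.not_mem_nil)
  | cons x xs ih =>
    intro l2 h1 h2 h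
    cases l2 with
    | nil => exact absurd ((h x).1 List.mem_cons_self) (List.not_mem_nil)
    | cons y ys =>
      rcases List.pairwise_cons.1 h1 with ⟨hx, hxs⟩
      rcases List.pairwise_cons.1 h2 with ⟨hy, hys⟩
      have hxy : x = y := by
        rcases List.mem_cons.1 ((h x).1 List.mem_cons_self) with rfl | hxm
        · rfl
        · have h1' := hy x hxm
          rcases List.mem_cons.1 ((h y).2 List.mem_cons_self) with rfl | hym
          · rfl
          · have := hx y hym; omega
      subst hxy
      congr 1
      apply ih hxs hys
      intro a
      constructor
      · intro ha
        have hax : x < a := hx a ha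
        rcases List.mem_cons.1 ((h a).1 (List.mem_cons_of_mem _ ha)) with rfl | h'
        · omega
        · exact h'
      · intro ha
        have hax : x < a := hy a ha
        rcases List.mem_cons.1 ((h a).2 (List.mem_cons_of_mem _ ha)) with rfl | h'
        · omega
        · exact h'

-- ===== VERDICT (by name: the statement is the Claim_ definition above) =====
theorem get_ordered_offsets_spec : Claim_equal_get_ordered_offsets := by
  intro offset_table _
  unfold Spec_get_ordered_offsets get_ordered_offsets get_ordered_offsets_alt
  rcases foldA_inv offset_table [] List.Pairwise.nil with ⟨hpA, hmA⟩
  set filtered := offset_table.filter (fun x => decide (2 < x)) with hf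
  set sortedL := PySem.List.sorted filtered (fun x => x) false with hsrt
  have hsorted : sortedL.Pairwise (· ≤ ·) := PySem.List.sorted_pairwise filtered (fun x => x)
  rcases foldB_inv sortedL [] List.Pairwise.nil hsorted (by simp) with ⟨hpB, hmB⟩
  apply eq_of_pairwise_lt_of_mem_iff hpA hpB
  intro a
  rw [hmA a, hmB a]
  simp [hsrt, PySem.List.mem_sorted, hf, List.mem_filter]
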